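-- pv_equiv track=rewrite | github.com/SSAFY-9-S4-STUDY/SWEAB | day26/P_152995/P_152995_gwanhyeong.py | solution
-- ===== SOURCE A (Python) =====
-- def solution(scores):
--     answer = 1
--     wanho = scores[0]
--     wanho_sum = sum(wanho)
--     scores.sort(key=lambda x:(-x[0], x[1]))
--     max_test = 0
--     for score in scores:
--         if wanho[0] < score[0] and wanho[1] < score[1]:
--             return -1
--
--         if score[1] >= max_test:
--             max_test = score[1]
--             if sum(score) > wanho_sum:
--                 answer += 1
--
--     return answer
-- ===== SOURCE B (Python) =====
-- def solution(scores):
--     # Sort-free brute force: count people not strictly dominated by anyone.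
--     # NOTE: unlike the original, this does not sort `scores` in place
--     # (the equivalence claimed is about the return value only).
--     wanho = scores[0]
--     wanho_sum = sum(wanho)
--     if any(wanho[0] < s[0] and wanho[1] < s[1] for s in scores):
--         return -1
--     return 1 + sum(
--         1
--         for s in scores
--         if sum(s) > wanho_sum
--         and not any(t[0] > s[0] and t[1] > s[1] for t in scores)
--     )
-- ===== Notes on version B (the rewrite author's own statement) =====
-- stated objective: alternative
-- what changed: Replaces A's sort-then-running-max scan with a sort-free brute-force domination count (a person is ranked iff nobody strictly beats them on both of the first two scores); B also does not mutate scores in place, while A sorts it.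
-- intended difference: On inputs where nobody strictly beats person 0 on both first scores but some undominated person with a total above person 0's has a negative second score, A returns a smaller count (its running max starts at 0, so such people are silently skipped) while B counts them; counting every undominated higher-total person is the intended rank. — e.g. on solution([[0, 0], [5, -1]]): A returns 1, B returns 2
import Mathlib
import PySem

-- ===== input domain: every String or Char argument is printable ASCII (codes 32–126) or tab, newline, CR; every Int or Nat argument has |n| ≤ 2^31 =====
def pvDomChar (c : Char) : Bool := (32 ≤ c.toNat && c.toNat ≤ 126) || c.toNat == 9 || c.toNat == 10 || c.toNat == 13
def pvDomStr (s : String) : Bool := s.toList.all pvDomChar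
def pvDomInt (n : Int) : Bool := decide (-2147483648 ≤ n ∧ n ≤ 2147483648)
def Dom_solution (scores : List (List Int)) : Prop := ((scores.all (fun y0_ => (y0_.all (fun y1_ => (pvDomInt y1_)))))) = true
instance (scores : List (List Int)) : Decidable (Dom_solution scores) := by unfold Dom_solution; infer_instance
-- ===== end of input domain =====

-- B replaces A's sort-plus-running-max scan by a sort-free brute-force domination count
-- (alternative algorithm, no speed claim); A sorts `scores` in place, B does not mutate it —
-- the equivalence proved here is about the return value only.


-- ===== PORT A =====
def pyFst (s : List Int) : Int := PySem.List.pyGetD s 0 0   -- s[0] (defaulted; Pre_ keeps it in range)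
def pySnd (s : List Int) : Int := PySem.List.pyGetD s 1 0   -- s[1]

def solutionLoop (wanho : List Int) (wanho_sum : Int) :
    List (List Int) → Int → Int → Int
  | [], answer, _ => answer
  | score :: rest, answer, max_test =>
    if pyFst wanho < pyFst score ∧ pySnd wanho < pySnd score then -1
    else if max_test ≤ pySnd score then
      solutionLoop wanho wanho_sum rest
        (if wanho_sum < score.sum then answer + 1 else answer) (pySnd score)
    else solutionLoop wanho wanho_sum rest answer max_test

def solution (scores : List (List Int)) : Int :=
  let wanho := PySem.List.pyGetD scores 0 []
  let wanho_sum := wanho.sum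
  let sortedScores := PySem.List.sorted2 scores (fun x => -(pyFst x)) (fun x => pySnd x)
  solutionLoop wanho wanho_sum sortedScores 1 0

-- ===== PORT B =====
def dominatesB (t s : List Int) : Bool :=
  decide (pyFst s < pyFst t) && decide (pySnd s < pySnd t)

def solution_alt (scores : List (List Int)) : Int :=
  let wanho := PySem.List.pyGetD scores 0 []
  let wanho_sum := wanho.sum
  if scores.any (fun s => dominatesB s wanho) then -1
  else
    1 + ((scores.filter (fun s =>
        decide (wanho_sum < s.sum) &&
        !(scores.any (fun t => dominatesB t s)))).length : Int)

-- ===== PRECONDITION & SPEC =====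
-- Pre_ excludes exactly the inputs where the Python A raises (IndexError): an empty list,
-- or a person with fewer than two scores (scores[0], x[0]/x[1] in the sort key).
def Pre_solution (scores : List (List Int)) : Prop :=
  scores ≠ [] ∧ ∀ s ∈ scores, 2 ≤ s.length
instance (scores : List (List Int)) : Decidable (Pre_solution scores) := by
  unfold Pre_solution; infer_instance

def pvWitness_solution : List (List Int) := [[1, 2], [3, 1]]

-- On inputs where nobody strictly beats person 0 on both first scores but some undominated
-- person with a total above person 0's has a NEGATIVE second score, A skips that person
-- (its running max starts at 0, never below) and returns a smaller count, while B counts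
-- everyone who is not strictly dominated, which is the intended rank.
def Dominated (scores : List (List Int)) (s : List Int) : Prop :=
  ∃ t ∈ scores, s.getD 0 0 < t.getD 0 0 ∧ s.getD 1 0 < t.getD 1 0

def D_solution (scores : List (List Int)) : Prop :=
  ¬ Dominated scores (scores.getD 0 []) ∧
  ∃ s ∈ scores, s.getD 1 0 < 0 ∧ (scores.getD 0 []).sum < s.sum ∧ ¬ Dominated scores s
instance (scores : List (List Int)) : Decidable (D_solution scores) := by
  unfold D_solution Dominated; infer_instance

def Spec_solution (scores : List (List Int)) (out : Int) : Prop :=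
  ¬ D_solution scores → out = solution_alt scores
instance (scores : List (List Int)) (out : Int) : Decidable (Spec_solution scores out) := by
  unfold Spec_solution; infer_instance

def pvDiffWitness_solution : List (List Int) := [[0, 0], [5, -1]]
def pvDiffWitnessOut_solution : Int × Int := (1, 2)

-- ===== CLAIM (what is proved, stated in full; the proofs are below) =====
def Claim_unchanged_solution : Prop :=
  ∀ (scores : List (List Int)), Dom_solution scores → Pre_solution scores →
    Spec_solution scores (solution scores)
def Claim_changed_solution : Prop :=
  Dom_solution (pvDiffWitness_solution) ∧ Pre_solution (pvDiffWitness_solution) ∧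
  D_solution (pvDiffWitness_solution) ∧
  solution (pvDiffWitness_solution) = pvDiffWitnessOut_solution.1 ∧
  solution_alt (pvDiffWitness_solution) = pvDiffWitnessOut_solution.2 ∧
  pvDiffWitnessOut_solution.1 ≠ pvDiffWitnessOut_solution.2
def Claim_exact_solution : Prop :=
  ∀ (scores : List (List Int)), Dom_solution scores → Pre_solution scores →
    D_solution scores → solution scores ≠ solution_alt scores

-- ===== LEMMAS AND PROOFS =====
lemma pyFst_getD (s : List Int) : pyFst s = s.getD 0 0 := by
  simp [pyFst, PySem.List.pyGetD_zero]

lemma pySnd_getD (s : List Int) : pySnd s = s.getD 1 0 := by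
  simp [pySnd, PySem.List.pyGetD_ofNat']

-- the sorted order of A: descending first score, ties ascending second score
lemma loop_eq (w : List Int) (W : Int) (M : List (List Int))
    (hM : M.Pairwise (fun a b => pyFst b < pyFst a ∨ (pyFst a = pyFst b ∧ pySnd a ≤ pySnd b)))
    (ans m : Int) :
    solutionLoop w W M ans m =
      if M.any (fun s => dominatesB s w) then -1
      else ans + ((M.filter (fun s =>
          decide (m ≤ pySnd s) && decide (W < s.sum) &&
          !(M.any (fun t => dominatesB t s)))).length : Int) := by
  induction M generalizing ans m with
  | nil => simp [solutionLoop]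
  | cons s r ih =>
    rcases List.pairwise_cons.mp hM with ⟨hs, hr⟩
    by_cases hdw : pyFst w < pyFst s ∧ pySnd w < pySnd s
    · simp [solutionLoop, hdw, dominatesB]
    · have hdwb : dominatesB s w = false := by
        simp [dominatesB]; omega
      have hanyw : (s :: r).any (fun t => dominatesB t w) = r.any (fun t => dominatesB t w) := by
        simp [hdwb]
      by_cases hany : r.any (fun t => dominatesB t w) = true
      · -- someone dominates w: both sides are -1
        have lhs : solutionLoop w W (s :: r) ans m = -1 := by
          by_cases hm : m ≤ pySnd s
          · rw [show solutionLoop w W (s :: r) ans m =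
                solutionLoop w W r (if W < s.sum then ans + 1 else ans) (pySnd s) by
                simp [solutionLoop, hdw, hm]]
            rw [ih hr, hany]; simp
          · rw [show solutionLoop w W (s :: r) ans m = solutionLoop w W r ans m by
                simp [solutionLoop, hdw, hm]]
            rw [ih hr, hany]; simp
        rw [lhs, hanyw, hany]; simp
      · simp only [Bool.not_eq_true] at hany
        have hanyw' : (s :: r).any (fun t => dominatesB t w) = false := by rw [hanyw, hany]
        rw [hanyw']
        have hnods : ∀ t ∈ s :: r, dominatesB t s = false := by
          intro t ht
          rcases List.mem_cons.mp ht with rfl | ht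
          · simp [dominatesB]
          · rcases hs t ht with h | h <;> (simp [dominatesB]; omega)
        have hnodsany : (s :: r).any (fun t => dominatesB t s) = false :=
          List.any_eq_false.mpr (by intro t ht; simp [hnods t ht])
        by_cases hm : m ≤ pySnd s
        · -- s passes the running-max test
          rw [show solutionLoop w W (s :: r) ans m =
              solutionLoop w W r (if W < s.sum then ans + 1 else ans) (pySnd s) by
              simp [solutionLoop, hdw, hm]]
          rw [ih hr, hany]
          have htail : ∀ t ∈ r,
              (decide (m ≤ pySnd t) && decide (W < t.sum) &&
                !((s :: r).any (fun u => dominatesB u t))) =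
              (decide (pySnd s ≤ pySnd t) && decide (W < t.sum) &&
                !(r.any (fun u => dominatesB u t))) := by
            intro t ht
            have hst := hs t ht
            have hanyt : (s :: r).any (fun u => dominatesB u t) =
                (dominatesB s t || r.any (fun u => dominatesB u t)) := by simp
            rw [hanyt]
            by_cases hdst : dominatesB s t = true
            · have h1 : pyFst t < pyFst s ∧ pySnd t < pySnd s := by
                simpa [dominatesB] using hdst
              have h2 : decide (pySnd s ≤ pySnd t) = false := by simp; omega
              simp [hdst, h2]
            · simp only [Bool.not_eq_true] at hdst
              have h2 : ¬(pyFst t < pyFst s ∧ pySnd t < pySnd s) := by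
                intro hc; rw [show dominatesB s t = true by simp [dominatesB]; omega] at hdst
                simp at hdst
              have hle : pySnd s ≤ pySnd t := by rcases hst with h | h <;> omega
              have e1 : decide (m ≤ pySnd t) = true := by simp; omega
              have e2 : decide (pySnd s ≤ pySnd t) = true := by simp; omega
              simp [hdst, e1, e2]
          rw [List.filter_cons, List.filter_congr htail]
          have hps : (decide (m ≤ pySnd s) && decide (W < s.sum) &&
              !((s :: r).any (fun t => dominatesB t s))) = decide (W < s.sum) := by
            rw [hnodsany]; simp [hm]
          rw [hps]
          by_cases hsum : W < s.sum <;> simp [hsum] <;> push_cast <;> ring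
        · -- s fails the running-max test
          rw [show solutionLoop w W (s :: r) ans m = solutionLoop w W r ans m by
              simp [solutionLoop, hdw, hm]]
          rw [ih hr, hany]
          have htail : ∀ t ∈ r,
              (decide (m ≤ pySnd t) && decide (W < t.sum) &&
                !((s :: r).any (fun u => dominatesB u t))) =
              (decide (m ≤ pySnd t) && decide (W < t.sum) &&
                !(r.any (fun u => dominatesB u t))) := by
            intro t ht
            have hanyt : (s :: r).any (fun u => dominatesB u t) =
                (dominatesB s t || r.any (fun u => dominatesB u t)) := by simp
            rw [hanyt]
            by_cases hmt : m ≤ pySnd t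
            · have : dominatesB s t = false := by simp [dominatesB]; omega
              simp [this]
            · have : decide (m ≤ pySnd t) = false := by simp; omega
              simp [this]
          rw [List.filter_cons, List.filter_congr htail]
          have hps : (decide (m ≤ pySnd s) && decide (W < s.sum) &&
              !((s :: r).any (fun t => dominatesB t s))) = false := by
            have : decide (m ≤ pySnd s) = false := by simp; omega
            simp [this]
          rw [hps]
          simp

lemma sorted2_pairwiseR (xs : List (List Int)) :
    (PySem.List.sorted2 xs (fun x => -(pyFst x)) (fun x => pySnd x)).Pairwise
      (fun a b => pyFst b < pyFst a ∨ (pyFst a = pyFst b ∧ pySnd a ≤ pySnd b)) := by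
  have hkey : (PySem.List.sorted2 xs (fun x => -(pyFst x)) (fun x => pySnd x)) =
      PySem.List.sorted xs (fun x => toLex (-(pyFst x), pySnd x)) := by
    rw [PySem.List.sorted_eq_foldl_insertBy]
    show List.foldl (fun acc x => PySem.List.insertBy _ x acc) [] xs = _
    congr 1
    funext acc x
    congr 1
    funext a b
    show (decide (-(pyFst a) < -(pyFst b)) || !decide (-(pyFst b) < -(pyFst a)) && decide (pySnd a < pySnd b)) = _
    rcases lt_trichotomy (pyFst a) (pyFst b) with h | h | h <;>
      simp [Prod.Lex.lt_iff, h] <;> omega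
  rw [hkey]
  refine (PySem.List.sorted_pairwise xs _).imp ?_
  intro a b hab
  rw [Prod.Lex.le_iff] at hab
  simp at hab
  omega

lemma solution_char (scores : List (List Int)) :
    solution scores =
      if scores.any (fun s => dominatesB s (scores.getD 0 [])) then -1
      else 1 + ((scores.filter (fun s =>
          decide (0 ≤ pySnd s) && decide ((scores.getD 0 []).sum < s.sum) &&
          !(scores.any (fun t => dominatesB t s)))).length : Int) := by
  unfold solution
  simp only [PySem.List.pyGetD_zero]
  rw [loop_eq _ _ _ (sorted2_pairwiseR scores)]
  have hperm : (PySem.List.sorted2 scores (fun x => -(pyFst x)) (fun x => pySnd x)).Perm scores :=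
    PySem.List.sorted2_perm scores _ _ false
  rw [hperm.any_eq]
  have hin : ∀ x ∈ PySem.List.sorted2 scores (fun x => -(pyFst x)) (fun x => pySnd x),
      (decide ((0 : Int) ≤ pySnd x) && decide ((scores.getD 0 []).sum < x.sum) &&
        !((PySem.List.sorted2 scores (fun x => -(pyFst x)) (fun x => pySnd x)).any
            (fun t => dominatesB t x))) =
      (decide ((0 : Int) ≤ pySnd x) && decide ((scores.getD 0 []).sum < x.sum) &&
        !(scores.any (fun t => dominatesB t x))) := by
    intro x _
    rw [hperm.any_eq]
  rw [List.filter_congr hin, (hperm.filter _).length_eq]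

lemma filter_length_lt {α : Type} (p q : α → Bool) (l : List α)
    (hpq : ∀ x ∈ l, p x = true → q x = true) (a : α) (ha : a ∈ l)
    (hqa : q a = true) (hpa : p a = false) :
    (l.filter p).length < (l.filter q).length := by
  induction l with
  | nil => cases ha
  | cons b t ih =>
    have hmono : (t.filter p).length ≤ (t.filter q).length := by
      have := List.countP_mono_left (p := p) (q := q) (l := t)
        (fun x hx => hpq x (List.mem_cons_of_mem _ hx))
      simpa [List.countP_eq_length_filter] using this
    rcases List.mem_cons.mp ha with rfl | ha'
    · rw [List.filter_cons, List.filter_cons, hpa, hqa]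
      simp; omega
    · have hlt := ih (fun x hx h => hpq x (List.mem_cons_of_mem _ hx) h) ha'
      rw [List.filter_cons, List.filter_cons]
      by_cases hb : p b = true
      · rw [hb, hpq b (List.mem_cons_self ..) hb]; simp; omega
      · simp only [Bool.not_eq_true] at hb
        rw [hb]
        by_cases hqb : q b = true <;> simp [hqb] <;> omega

-- B's value, written without the let-bindings
lemma solution_alt_char (scores : List (List Int)) :
    solution_alt scores =
      if scores.any (fun s => dominatesB s (scores.getD 0 [])) then -1
      else 1 + ((scores.filter (fun s =>
          decide ((scores.getD 0 []).sum < s.sum) &&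
          !(scores.any (fun t => dominatesB t s)))).length : Int) := by
  unfold solution_alt
  simp only [PySem.List.pyGetD_zero]

-- the first conjunct of D_solution, restated through pyFst/pySnd
lemma nodom_iff (scores : List (List Int)) (s : List Int) :
    (scores.any (fun t => dominatesB t s) = false) ↔ ¬ Dominated scores s := by
  rw [List.any_eq_false]
  unfold Dominated
  constructor
  · rintro h ⟨t, ht, hc⟩
    have := h t ht
    simp [dominatesB, pyFst_getD, pySnd_getD, List.getD] at this hc
    omega
  · intro h t ht
    by_contra hc
    exact h ⟨t, ht, by simp [dominatesB, pyFst_getD, pySnd_getD, List.getD] at hc ⊢; omega⟩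

-- ===== VERDICT (by name: the statement is the Claim_ definition above) =====
theorem solution_spec : Claim_unchanged_solution := by
  intro scores _ _
  unfold Spec_solution
  intro hnD
  rw [solution_char, solution_alt_char]
  by_cases hany : scores.any (fun s => dominatesB s (scores.getD 0 [])) = true
  · rw [hany]; simp
  · simp only [Bool.not_eq_true] at hany
    rw [hany]
    simp only [Bool.false_eq_true, if_false]
    have hnd := (nodom_iff scores _).mp hany
    unfold D_solution at hnD
    have hnobad : ∀ s ∈ scores, ¬(s.getD 1 0 < 0 ∧ (scores.getD 0 []).sum < s.sum ∧
        ¬ Dominated scores s) :=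
      fun s hs hb => hnD ⟨hnd, s, hs, hb⟩
    have hin : ∀ s ∈ scores,
        (decide ((0 : Int) ≤ pySnd s) && decide ((scores.getD 0 []).sum < s.sum) &&
          !(scores.any (fun t => dominatesB t s))) =
        (decide ((scores.getD 0 []).sum < s.sum) && !(scores.any (fun t => dominatesB t s))) := by
      intro s hsmem
      by_cases h1 : (scores.getD 0 []).sum < s.sum
      · by_cases h2 : scores.any (fun t => dominatesB t s) = true
        · simp [h2]
        · simp only [Bool.not_eq_true] at h2
          have hnodom : ¬ Dominated scores s := (nodom_iff scores s).mp h2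
          have : ¬ s.getD 1 0 < 0 := fun hneg => hnobad s hsmem ⟨hneg, h1, hnodom⟩
          have hpos : (0 : Int) ≤ pySnd s := by rw [pySnd_getD]; omega
          simp [h2, hpos]
      · have h1' : ¬((scores[0]?.getD []).sum < s.sum) := by simpa [List.getD] using h1
        simp [h1']
    rw [List.filter_congr hin]

theorem solution_changed : Claim_changed_solution := by
  unfold Claim_changed_solution; decide

theorem solution_tight : Claim_exact_solution := by
  intro scores _ _ hD
  obtain ⟨hnd, s, hsmem, hneg, hsum, hundom⟩ := hD
  have hany : scores.any (fun t => dominatesB t (scores.getD 0 [])) = false :=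
    (nodom_iff scores _).mpr hnd
  rw [solution_char, solution_alt_char, hany]
  simp only [Bool.false_eq_true, if_false]
  have hlt : ((scores.filter (fun s =>
        decide ((0 : Int) ≤ pySnd s) && decide ((scores.getD 0 []).sum < s.sum) &&
        !(scores.any (fun t => dominatesB t s)))).length) <
      ((scores.filter (fun s =>
        decide ((scores.getD 0 []).sum < s.sum) &&
        !(scores.any (fun t => dominatesB t s)))).length) := by
    apply filter_length_lt _ _ _ ?_ s hsmem
    · have h2 : scores.any (fun t => dominatesB t s) = false := (nodom_iff scores s).mpr hundom
      have hsum' : (scores[0]?.getD []).sum < s.sum := by simpa [List.getD] using hsum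
      simp [hsum', h2]
    · have : ¬ ((0 : Int) ≤ pySnd s) := by rw [pySnd_getD]; omega
      simp [this]
    · intro x _ hx
      simp only [Bool.and_eq_true, decide_eq_true_eq] at hx ⊢
      exact ⟨hx.1.2, hx.2⟩
  intro hc
  omega
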